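-- pv_equiv track=rewrite | github.com/Martin-Paez/Python | Proyecto 5 - GoogleSheet Apps/src/imports/lector.py | solo_espacios
-- ===== SOURCE A (Python) =====
-- def solo_espacios(string):
-- 	ok=True
-- 	if(len(string)>0):#Elimino espacios
-- 		cont=0
-- 		while(cont<len(string) and (string[cont]==" " or string[cont]=="\t")):
-- 			cont=cont+1
-- 		if(cont<len(string)):
-- 			ok=False
-- 	return ok
-- ===== SOURCE B (Python) =====
-- def solo_espacios(string):
--     return set(string) <= {" ", "\t"}
-- ===== Notes on version B (the rewrite author's own statement) =====
-- stated objective: idiomatic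
-- what changed: Replaces the indexed while-scan with early exit by building the set of distinct characters once and testing subset containment against {' ', '\t'}.
import Mathlib
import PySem

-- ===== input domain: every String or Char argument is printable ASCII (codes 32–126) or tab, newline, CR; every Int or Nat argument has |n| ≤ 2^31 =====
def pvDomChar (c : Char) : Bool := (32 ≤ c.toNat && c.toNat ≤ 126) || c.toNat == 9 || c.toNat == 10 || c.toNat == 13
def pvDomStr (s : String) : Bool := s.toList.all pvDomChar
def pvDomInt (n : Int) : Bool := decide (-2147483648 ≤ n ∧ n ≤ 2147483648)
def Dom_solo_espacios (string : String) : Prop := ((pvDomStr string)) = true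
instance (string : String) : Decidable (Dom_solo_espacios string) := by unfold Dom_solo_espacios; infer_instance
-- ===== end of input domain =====

-- B replaces A's indexed while-scan with a set-of-characters subset test; objective: idiomatic.

-- ===== PORT A =====
-- the while loop: advance cont while in range and the character is ' ' or '\t'
def soloEspaciosLoop (s : List Char) (cont : Nat) : Nat :=
  if h : cont < s.length then
    if s[cont] = ' ' ∨ s[cont] = '\t' then soloEspaciosLoop s (cont + 1)
    else cont
  else cont
termination_by s.length - cont
decreasing_by omega

def solo_espacios (string : String) : Bool :=
  let s := string.toList
  if s.length > 0 then
    let cont := soloEspaciosLoop s 0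
    if cont < s.length then false else true
  else true

-- ===== PORT B =====
def solo_espacios_alt (string : String) : Bool :=
  PySem.Set.issubset (PySem.Set.ofList string.toList) [' ', '\t']

-- ===== PRECONDITION & SPEC =====
def Spec_solo_espacios (string : String) (out : Bool) : Prop := out = solo_espacios_alt string
instance (string : String) (out : Bool) : Decidable (Spec_solo_espacios string out) := by unfold Spec_solo_espacios; infer_instance

-- ===== CLAIM (what is proved, stated in full; the proofs are below) =====
def Claim_equal_solo_espacios : Prop := ∀ (string : String), Dom_solo_espacios string → Spec_solo_espacios string (solo_espacios string)

-- ===== LEMMAS AND PROOFS =====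
theorem soloEspaciosLoop_spec (s : List Char) (cont : Nat) :
    s.length ≤ soloEspaciosLoop s cont ↔
      ∀ i (h : i < s.length), cont ≤ i → (s[i] = ' ' ∨ s[i] = '\t') := by
  fun_induction soloEspaciosLoop s cont with
  | case1 cont h hsp ih =>
    rw [ih]
    constructor
    · intro hall i hi hci
      rcases Nat.eq_or_lt_of_le hci with rfl | hlt
      · exact hsp
      · exact hall i hi hlt
    · intro hall i hi hci
      exact hall i hi (Nat.le_of_succ_le hci)
  | case2 cont h hsp =>
    constructor
    · intro hle; omega
    · intro hall; exact absurd (hall cont h le_rfl) hsp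
  | case3 cont h =>
    constructor
    · intro _ i hi _; omega
    · intro _; omega

theorem solo_espacios_spec : Claim_equal_solo_espacios := by
  intro string _
  unfold Spec_solo_espacios solo_espacios solo_espacios_alt
  dsimp only
  rw [Bool.eq_iff_iff, PySem.Set.issubset_iff]
  simp only [PySem.Set.mem_ofList]
  constructor
  · intro hA c hc
    obtain ⟨i, hi, rfl⟩ := List.mem_iff_getElem.mp hc
    split_ifs at hA with hlen hcont
    · have := (soloEspaciosLoop_spec string.toList 0).mp (by omega)
      rcases this i hi (Nat.zero_le _) with h | h <;> simp [h]
    · omega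
  · intro hall
    split_ifs with hlen hcont
    · exfalso
      have hge := (soloEspaciosLoop_spec string.toList 0).mpr ?_
      · omega
      · intro i hi _
        have hm := hall _ (List.getElem_mem hi)
        simpa using hm
    · rfl
    · rfl
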